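-- pv_equiv track=rewrite | github.com/RaviMishra-94/leet_sol | asterisk.py | countAsterisks
-- ===== SOURCE A (Python) =====
-- def countAsterisks(s: str) -> int:
--     in_pair = False
--     asterisk_count = 0
--
--     for char in s:
--         if char == '|':
--             in_pair = not in_pair
--         elif char == '*' and not in_pair:
--             asterisk_count += 1
--
--     return asterisk_count
-- ===== SOURCE B (Python) =====
-- def countAsterisks(s: str) -> int:
--     return sum(seg.count('*') for i, seg in enumerate(s.split('|')) if i % 2 == 0)
-- ===== Notes on version B (the rewrite author's own statement) =====
-- stated objective: simpler
-- what changed: Replaces the per-character state-toggling loop with splitting on the pipe separator and summing asterisk counts over the even-indexed segments (the ones outside pipe pairs).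
import Mathlib
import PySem

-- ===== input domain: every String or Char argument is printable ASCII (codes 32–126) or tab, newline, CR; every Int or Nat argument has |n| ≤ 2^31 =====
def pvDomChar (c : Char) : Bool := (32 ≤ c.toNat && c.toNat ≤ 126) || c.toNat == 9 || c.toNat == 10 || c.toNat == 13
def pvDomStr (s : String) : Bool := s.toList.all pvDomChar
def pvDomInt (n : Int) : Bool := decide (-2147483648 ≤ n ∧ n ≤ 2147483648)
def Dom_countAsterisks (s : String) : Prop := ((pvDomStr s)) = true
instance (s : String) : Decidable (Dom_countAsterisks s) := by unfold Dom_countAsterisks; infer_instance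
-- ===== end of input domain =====

-- B replaces A's per-character state-toggling loop by split('|') + summing '*' counts
-- over the even-indexed segments (objective: simpler).

-- ===== PORT A =====
-- literal port of A: one pass over the characters, toggling in_pair at '|',
-- counting '*' when not in_pair
def countAsterisks (s : String) : Int :=
  (s.toList.foldl
    (fun (st : Bool × Int) c =>
      if c = '|' then (!st.1, st.2)
      else if c = '*' ∧ st.1 = false then (st.1, st.2 + 1)
      else st)
    (false, 0)).2

-- ===== PORT B =====
-- literal port of B: s.split('|') is List.splitOn '|' on the characters,
-- seg.count('*') is List.count, enumerate is PySem.List.enumerate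
def countAsterisks_alt (s : String) : Int :=
  ((PySem.List.enumerate (s.toList.splitOn '|')).foldl
    (fun (acc : Int) p =>
      if PySem.Int.mod p.1 2 = 0 then acc + (p.2.count '*' : Int) else acc)
    0)

-- ===== PRECONDITION & SPEC =====
def Spec_countAsterisks (s : String) (out : Int) : Prop := out = countAsterisks_alt s
instance (s : String) (out : Int) : Decidable (Spec_countAsterisks s out) := by unfold Spec_countAsterisks; infer_instance

-- ===== CLAIM (what is proved, stated in full; the proofs are below) =====
def Claim_equal_countAsterisks : Prop := ∀ (s : String), Dom_countAsterisks s → Spec_countAsterisks s (countAsterisks s)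

-- ===== LEMMAS AND PROOFS =====

-- alternating sum of '*'-counts: counts segments at even-distance positions when b = false
def pvEvenSum : Bool → List (List Char) → Int
  | _, [] => 0
  | b, seg :: rest => (if b then 0 else (seg.count '*' : Int)) + pvEvenSum (!b) rest

theorem pvFoldA_eq (cs : List Char) : ∀ (b : Bool) (acc : Int),
    (cs.foldl
      (fun (st : Bool × Int) c =>
        if c = '|' then (!st.1, st.2)
        else if c = '*' ∧ st.1 = false then (st.1, st.2 + 1)
        else st)
      (b, acc)).2 = acc + pvEvenSum b (cs.splitOn '|') := by
  induction cs with
  | nil => intro b acc; simp [List.splitOn, pvEvenSum]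
  | cons c cs ih =>
    intro b acc
    by_cases hc : c = '|'
    · subst hc
      simp only [List.foldl_cons, List.splitOn, List.splitOnP_cons]
      simp only [List.splitOn] at ih
      simp [pvEvenSum, ih]
    · have hne : (List.splitOnP (fun a => a == '|') cs) ≠ [] := List.splitOnP_ne_nil _ _
      obtain ⟨h, t, hht⟩ := List.exists_cons_of_ne_nil hne
      simp only [List.foldl_cons, List.splitOn, List.splitOnP_cons, beq_iff_eq,
        if_neg hc, hht, List.modifyHead_cons]
      simp only [List.splitOn, hht] at ih
      by_cases hs : c = '*'
      · subst hs
        cases b with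
        | false => simp [ih, pvEvenSum]; ring
        | true => simp [ih, pvEvenSum]
      · simp [hs, ih, pvEvenSum]

theorem pvMod2_succ (k : Int) :
    PySem.Int.mod (k + 1) 2 = 0 ↔ ¬ PySem.Int.mod k 2 = 0 := by
  simp only [PySem.Int.mod, Int.fmod_eq_emod]
  omega

theorem pvFoldB_eq (segs : List (List Char)) : ∀ (k acc : Int),
    ((PySem.List.enumerate segs k).foldl
      (fun (acc : Int) p =>
        if PySem.Int.mod p.1 2 = 0 then acc + (p.2.count '*' : Int) else acc)
      acc) = acc + pvEvenSum (!(PySem.Int.mod k 2 = 0 : Bool)) segs := by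
  induction segs with
  | nil => intro k acc; simp [PySem.List.enumerate_nil, pvEvenSum]
  | cons seg rest ih =>
    intro k acc
    rw [PySem.List.enumerate_cons, List.foldl_cons, ih (k + 1)]
    have h2 := pvMod2_succ k
    by_cases hk : PySem.Int.mod k 2 = 0
    · have hk1 : ¬ PySem.Int.mod (k + 1) 2 = 0 := fun h => (h2.mp h) hk
      rw [if_pos hk, decide_eq_true hk, decide_eq_false hk1]
      simp [pvEvenSum]; ring
    · have hk1 : PySem.Int.mod (k + 1) 2 = 0 := h2.mpr hk
      rw [if_neg hk, decide_eq_true hk1, decide_eq_false hk]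
      simp [pvEvenSum]

-- ===== VERDICT (by name: the statement is the Claim_ definition above) =====
theorem countAsterisks_spec : Claim_equal_countAsterisks := by
  intro s _
  unfold Spec_countAsterisks countAsterisks countAsterisks_alt
  rw [pvFoldA_eq, pvFoldB_eq]
  norm_num [PySem.Int.mod]
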